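-- pv_equiv track=rewrite | github.com/ipoomzakungi/Elpis | backend/src/quikstrike_matrix/conversion.py | _merge_source_views
-- ===== SOURCE A (Python) =====
-- MATRIX_VIEW_ORDER = (
--     "open_interest_matrix",
--     "oi_change_matrix",
--     "volume_matrix",
-- )
--
-- def _merge_source_views(current: str, incoming: str) -> str:
--     values = {
--         value.strip()
--         for value in current.replace("|", ",").split(",")
--         if value.strip()
--     }
--     values.add(incoming)
--     ordered = [value for value in MATRIX_VIEW_ORDER if value in values]
--     ordered.extend(sorted(values.difference(MATRIX_VIEW_ORDER)))
--     return ",".join(ordered)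
-- ===== SOURCE B (Python) =====
-- MATRIX_VIEW_ORDER = (
--     "open_interest_matrix",
--     "oi_change_matrix",
--     "volume_matrix",
-- )
--
--
-- def _merge_source_views(current: str, incoming: str) -> str:
--     rank = {view: i for i, view in enumerate(MATRIX_VIEW_ORDER)}
--     seen = set()
--     token = []
--     for ch in current + ",":
--         if ch == "|" or ch == ",":
--             t = "".join(token).strip()
--             if t:
--                 seen.add(t)
--             token = []
--         else:
--             token.append(ch)
--     seen.add(incoming)
--     return ",".join(
--         sorted(seen, key=lambda v: (rank.get(v, len(MATRIX_VIEW_ORDER)), v))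
--     )
-- ===== Notes on version B (the rewrite author's own statement) =====
-- stated objective: alternative
-- what changed: A's replace+split+set-comprehension staging and two ordering phases (fixed-order filter, then appended sorted set difference) are replaced by a single character-level scan of current that tokenizes on '|' and ',' while accumulating the deduped set, followed by one sort of that set under a composite (rank, value) key from a precomputed {view: index} dict.
import Mathlib
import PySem

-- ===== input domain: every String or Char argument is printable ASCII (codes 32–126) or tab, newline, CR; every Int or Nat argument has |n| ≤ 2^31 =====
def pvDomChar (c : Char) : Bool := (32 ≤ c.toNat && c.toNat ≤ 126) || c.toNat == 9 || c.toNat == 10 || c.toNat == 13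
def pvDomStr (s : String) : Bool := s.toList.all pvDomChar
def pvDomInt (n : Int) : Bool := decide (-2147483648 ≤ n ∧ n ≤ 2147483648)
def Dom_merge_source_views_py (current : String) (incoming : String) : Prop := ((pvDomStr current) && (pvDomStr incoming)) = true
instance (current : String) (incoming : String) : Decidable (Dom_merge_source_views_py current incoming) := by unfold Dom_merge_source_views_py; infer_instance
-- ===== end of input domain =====

-- B replaces A's replace+split+set-comprehension staging and its two ordering phases (fixed-order
-- filter, then appended sorted set difference) by a single character scan building the deduped set
-- and ONE composite-key (rank, value) sort — objective: alternative decomposition, same cost.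

-- ===== PORT A =====
def MATRIX_VIEW_ORDER : List String :=
  ["open_interest_matrix", "oi_change_matrix", "volume_matrix"]

-- set comprehension: strip each token of current.replace("|",",").split(","), keep the non-empty ones;
-- split? with the literal non-empty separator "," is always `some`, so the `.getD []` default is unreachable.
def merge_source_views_py (current : String) (incoming : String) : String :=
  let values : PySem.Set String :=
    PySem.Set.ofList
      ((((PySem.Str.split? (PySem.Str.replace current "|" ",") ",").getD []).map
          PySem.Str.strip).filter (fun v => !(v == "")))
  let values := PySem.Set.add values incoming
  let ordered := MATRIX_VIEW_ORDER.filter (fun v => PySem.Set.contains values v)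
  let ordered := ordered ++ PySem.List.sorted (PySem.Set.diff values MATRIX_VIEW_ORDER) (fun x => x) false
  PySem.Str.join "," ordered

-- ===== PORT B =====
-- rank = {view: i for i, view in enumerate(MATRIX_VIEW_ORDER)}
def ORDER_RANK : PySem.Dict String Int :=
  (PySem.List.enumerate MATRIX_VIEW_ORDER).foldl (fun d p => PySem.Dict.insert d p.2 p.1) PySem.Dict.empty

-- the for-loop over the characters of current + ",": state (seen, token); a '|' or ',' flushes the
-- stripped token into the set when non-empty ('"".join(token)' is String.ofList of the char list)
def merge_source_views_py_alt (current : String) (incoming : String) : String :=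
  let st :=
    (current.toList ++ [',']).foldl
      (fun (st : PySem.Set String × List Char) ch =>
        if ch == '|' || ch == ',' then
          let t := PySem.Str.strip (String.ofList st.2)
          (if t == "" then st.1 else PySem.Set.add st.1 t, ([] : List Char))
        else (st.1, st.2 ++ [ch]))
      (PySem.Set.empty, [])
  let seen := PySem.Set.add st.1 incoming
  PySem.Str.join ","
    (PySem.List.sorted2 seen
      (fun v => PySem.Dict.getD ORDER_RANK v (MATRIX_VIEW_ORDER.length : Int))
      (fun v => v) false)

-- ===== PRECONDITION & SPEC =====
def Spec_merge_source_views_py (current : String) (incoming : String) (out : String) : Prop := out = merge_source_views_py_alt current incoming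
instance (current : String) (incoming : String) (out : String) : Decidable (Spec_merge_source_views_py current incoming out) := by unfold Spec_merge_source_views_py; infer_instance

-- ===== CLAIM (what is proved, stated in full; the proofs are below) =====
def Claim_equal_merge_source_views_py : Prop := ∀ (current : String) (incoming : String), Dom_merge_source_views_py current incoming → Spec_merge_source_views_py current incoming (merge_source_views_py current incoming)

-- ===== LEMMAS AND PROOFS =====

def pvF (c : Char) : Char := if c == '|' then ',' else c

theorem pv_replace_go (l : List Char) : ∀ (fuel : Nat) (acc : List Char), l.length ≤ fuel →
    PySem.Chars.replace.go ['|'] [','] fuel l acc = acc.reverse ++ l.map pvF := by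
  induction l with
  | nil => intro fuel acc _; cases fuel <;> simp [PySem.Chars.replace.go]
  | cons c t ih =>
    intro fuel acc h
    cases fuel with
    | zero => simp at h
    | succ n =>
      simp only [PySem.Chars.replace.go]
      by_cases hc : c = '|'
      · subst hc
        rw [if_pos (by simp)]
        show PySem.Chars.replace.go _ _ n t (',' :: acc) = _
        rw [ih n (',' :: acc) (by simpa using h)]
        simp [pvF]
      · rw [if_neg (by simp [Ne.symm hc])]
        rw [ih n (c :: acc) (by simpa using h)]
        simp [pvF, hc]

def pvSplitCh (pre : List Char) : List Char → List (List Char)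
  | [] => [pre]
  | x :: xs => if x == ',' then pre :: pvSplitCh [] xs else pvSplitCh (pre ++ [x]) xs

theorem pv_splitOn_go (l : List Char) : ∀ (fuel : Nat) (cur : List Char) (acc : List (List Char)),
    l.length ≤ fuel →
    PySem.Chars.splitOn.go [','] fuel l cur acc = acc.reverse ++ pvSplitCh cur.reverse l := by
  induction l with
  | nil => intro fuel cur acc _; cases fuel <;> simp [PySem.Chars.splitOn.go, pvSplitCh]
  | cons c t ih =>
    intro fuel cur acc h
    cases fuel with
    | zero => simp at h
    | succ n =>
      simp only [PySem.Chars.splitOn.go]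
      by_cases hc : c = ','
      · subst hc
        rw [if_pos (by simp [List.isPrefixOf])]
        show PySem.Chars.splitOn.go _ n t [] (cur.reverse :: acc) = _
        rw [ih n [] (cur.reverse :: acc) (by simpa using h)]
        simp [pvSplitCh]
      · rw [if_neg (by simp [List.isPrefixOf, beq_eq_false_iff_ne.mpr (Ne.symm hc)])]
        rw [ih n (c :: cur) acc (by simpa using h)]
        simp [pvSplitCh, hc]


theorem pv_replace (l : List Char) :
    PySem.Chars.replace l ['|'] [','] = l.map pvF := by
  show PySem.Chars.replace.go ['|'] [','] l.length l [] = _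
  rw [pv_replace_go l l.length [] le_rfl]
  simp

theorem pv_splitOn (l : List Char) :
    PySem.Chars.splitOn l [','] = pvSplitCh [] l := by
  show PySem.Chars.splitOn.go [','] (l.length + 1) l [] [] = _
  rw [pv_splitOn_go l (l.length + 1) [] [] (by omega)]
  simp

theorem pv_tokens_A (current : String) :
    ((PySem.Str.split? (PySem.Str.replace current "|" ",") ",").getD [])
      = (pvSplitCh [] (current.toList.map pvF)).map String.ofList := by
  simp only [PySem.Str.split?, PySem.Chars.split?, PySem.Str.replace]
  rw [if_neg (by decide)]
  simp only [Option.map_some, Option.getD_some, String.toList_ofList]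
  have : ("|" : String).toList = ['|'] := by decide
  rw [this, (by decide : ("," : String).toList = [','])]
  rw [pv_replace, pv_splitOn]

def pvAddIf (s : PySem.Set String) (t : List Char) : PySem.Set String :=
  if PySem.Str.strip (String.ofList t) == "" then s
  else PySem.Set.add s (PySem.Str.strip (String.ofList t))

theorem pv_scan (l : List Char) : ∀ (s : PySem.Set String) (tok : List Char),
    ((l ++ [',']).foldl
      (fun (st : PySem.Set String × List Char) ch =>
        if ch == '|' || ch == ',' then
          let t := PySem.Str.strip (String.ofList st.2)
          (if t == "" then st.1 else PySem.Set.add st.1 t, ([] : List Char))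
        else (st.1, st.2 ++ [ch]))
      (s, tok)).1
    = (pvSplitCh tok (l.map pvF)).foldl pvAddIf s := by
  induction l with
  | nil =>
    intro s tok
    simp [pvSplitCh, pvAddIf]
  | cons c t ih =>
    intro s tok
    by_cases hc : c = '|' ∨ c = ','
    · have hsep : (c == '|' || c == ',') = true := by
        rcases hc with h | h <;> simp [h]
      have hf : pvF c = ',' := by
        rcases hc with h | h <;> simp [pvF, h]
      simp only [List.cons_append, List.foldl_cons, hsep, if_pos]
      rw [ih]
      simp [hf, pvSplitCh, pvAddIf]
    · rw [not_or] at hc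
      have hsep : (c == '|' || c == ',') = false := by
        simp [beq_eq_false_iff_ne.mpr hc.1, beq_eq_false_iff_ne.mpr hc.2]
      have hf : pvF c = c := by simp [pvF, beq_eq_false_iff_ne.mpr hc.1]
      simp only [List.cons_append, List.foldl_cons]
      rw [if_neg (by simp [hsep])]
      rw [ih]
      simp [hf, pvSplitCh, beq_eq_false_iff_ne.mpr hc.2]

theorem pv_mem_foldl_addIf (T : List (List Char)) : ∀ (s : PySem.Set String) (v : String),
    (v ∈ T.foldl pvAddIf s ↔ v ∈ s ∨
      v ∈ (T.map (fun t => PySem.Str.strip (String.ofList t))).filter (fun u => !(u == ""))) := by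
  induction T with
  | nil => intro s v; simp
  | cons t T ih =>
    intro s v
    simp only [List.foldl_cons, List.map_cons]
    rw [List.filter_cons]
    by_cases he : (PySem.Str.strip (String.ofList t) == "") = true
    · rw [ih]
      unfold pvAddIf
      rw [if_pos he, if_neg (by rw [he]; decide)]
    · have hb : (PySem.Str.strip (String.ofList t) == "") = false := by
        exact Bool.not_eq_true _ ▸ eq_false_of_ne_true he
      rw [ih]
      unfold pvAddIf
      rw [if_neg he, if_pos (by rw [hb]; decide)]
      rw [PySem.Set.mem_add, List.mem_cons]
      rw [or_assoc]

theorem pv_nodup_foldl_addIf (T : List (List Char)) : ∀ (s : PySem.Set String),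
    s.Nodup → (T.foldl pvAddIf s).Nodup := by
  induction T with
  | nil => intro s hs; simpa using hs
  | cons t T ih =>
    intro s hs
    simp only [List.foldl_cons]
    apply ih
    unfold pvAddIf
    split_ifs
    · exact hs
    · exact PySem.Set.nodup_add _ _ hs

-- B's rank of a view not among the known ones is len(MATRIX_VIEW_ORDER) = 3
theorem pv_rank_not_mem (v : String) (h : v ∉ MATRIX_VIEW_ORDER) :
    PySem.Dict.getD ORDER_RANK v (MATRIX_VIEW_ORDER.length : Int) = 3 := by
  simp only [MATRIX_VIEW_ORDER, List.mem_cons, not_or] at h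
  obtain ⟨h1, h2, h3, -⟩ := h
  show PySem.Dict.getD (PySem.Dict.mk [("open_interest_matrix",0),("oi_change_matrix",1),("volume_matrix",2)]) v _ = 3
  simp [PySem.Dict.getD, PySem.Dict.get?, List.find?,
    beq_eq_false_iff_ne.mpr (Ne.symm h1), beq_eq_false_iff_ne.mpr (Ne.symm h2),
    beq_eq_false_iff_ne.mpr (Ne.symm h3), MATRIX_VIEW_ORDER]

-- a sort with the tuple key (k1 v, v) is a sort under the lexicographic order on Lex (Int × String)
theorem pv_sorted2_eq_sorted_lex {α : Type} (xs : List α) (k1 : α → Int) (k2 : α → String) :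
    PySem.List.sorted2 xs k1 k2 false
      = PySem.List.sorted xs (fun x => toLex (k1 x, k2 x)) false := by
  simp only [PySem.List.sorted2, PySem.List.sorted, if_neg (by decide : ¬ (false = true))]
  congr 1
  funext acc x
  congr 1
  funext a b
  rcases lt_trichotomy (k1 a) (k1 b) with hlt | heq | hgt
  · simp [Prod.Lex.lt_iff, hlt, not_lt.mpr hlt.le]
  · simp [Prod.Lex.lt_iff, heq]
  · simp [Prod.Lex.lt_iff, hgt, not_lt.mpr hgt.le, (ne_of_gt hgt)]

-- B's composite sort key, as a value of the lexicographically ordered type (proof-only helper)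
def pvKey (v : String) : Lex (Int × String) :=
  toLex (PySem.Dict.getD ORDER_RANK v (MATRIX_VIEW_ORDER.length : Int), v)

theorem pv_MVO_pairwise : MATRIX_VIEW_ORDER.Pairwise (fun a b => pvKey a < pvKey b) := by
  have h01 : pvKey "open_interest_matrix" < pvKey "oi_change_matrix" := by
    apply Prod.Lex.lt_iff.mpr; left; decide
  have h02 : pvKey "open_interest_matrix" < pvKey "volume_matrix" := by
    apply Prod.Lex.lt_iff.mpr; left; decide
  have h12 : pvKey "oi_change_matrix" < pvKey "volume_matrix" := by
    apply Prod.Lex.lt_iff.mpr; left; decide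
  simp [MATRIX_VIEW_ORDER, List.pairwise_cons, h01, h02, h12]

-- the heart: A's two phases on a deduped set s produce B's single composite-key sort of any
-- deduped set t with the same members
theorem pv_phase (s t : PySem.Set String) (hs : s.Nodup) (ht : t.Nodup)
    (hmem : ∀ v, v ∈ s ↔ v ∈ t) :
    MATRIX_VIEW_ORDER.filter (fun v => PySem.Set.contains s v)
        ++ PySem.List.sorted (PySem.Set.diff s MATRIX_VIEW_ORDER) (fun x => x) false
      = PySem.List.sorted2 t
          (fun v => PySem.Dict.getD ORDER_RANK v (MATRIX_VIEW_ORDER.length : Int))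
          (fun v => v) false := by
  rw [pv_sorted2_eq_sorted_lex]
  have hd : (PySem.Set.diff s MATRIX_VIEW_ORDER).Nodup := PySem.Set.nodup_diff s _ hs
  set l1 := MATRIX_VIEW_ORDER.filter (fun v => PySem.Set.contains s v) with hl1
  set l2 := PySem.List.sorted (PySem.Set.diff s MATRIX_VIEW_ORDER) (fun x => x) false with hl2
  have hmem2 : ∀ x ∈ l2, x ∈ s ∧ x ∉ MATRIX_VIEW_ORDER := by
    intro x hx
    rw [hl2, PySem.List.mem_sorted, PySem.Set.mem_diff] at hx
    exact hx
  have hmem1 : ∀ x ∈ l1, x ∈ MATRIX_VIEW_ORDER ∧ x ∈ s := by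
    intro x hx
    rw [hl1, List.mem_filter, PySem.Set.contains_iff] at hx
    exact ⟨hx.1, hx.2⟩
  have hnd1 : l1.Nodup := List.Nodup.filter _ (by decide : MATRIX_VIEW_ORDER.Nodup)
  have hnd2 : l2.Nodup := ((PySem.List.sorted_perm _ _ _).nodup_iff).mpr hd
  have hdisj : ∀ a ∈ l1, ∀ b ∈ l2, a ≠ b := by
    intro a ha b hb heq
    subst heq
    exact (hmem2 a hb).2 (hmem1 a ha).1
  have hnd : (l1 ++ l2).Nodup := List.nodup_append.mpr ⟨hnd1, hnd2, hdisj⟩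
  symm
  apply PySem.List.sorted_eq_of_perm_of_pairwise_lt
  · rw [List.perm_ext_iff_of_nodup hnd ht]
    intro a
    rw [← hmem a]
    by_cases hm : a ∈ MATRIX_VIEW_ORDER <;>
      simp [hl1, hl2, List.mem_append, List.mem_filter,
        PySem.List.mem_sorted, PySem.Set.mem_diff, hm]
  · rw [List.pairwise_append]
    refine ⟨?_, ?_, ?_⟩
    · exact List.Pairwise.sublist List.filter_sublist pv_MVO_pairwise
    · have hle := PySem.List.sorted_pairwise (PySem.Set.diff s MATRIX_VIEW_ORDER) (fun x => x)
      have := List.Pairwise.and (hle) (hnd2)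
      refine List.Pairwise.imp_of_mem ?_ this
      intro a b ha hb hab
      have hra := pv_rank_not_mem a (hmem2 a ha).2
      have hrb := pv_rank_not_mem b (hmem2 b hb).2
      apply Prod.Lex.lt_iff.mpr
      right
      refine ⟨by simp [hra, hrb], lt_of_le_of_ne hab.1 hab.2⟩
    · intro x hx y hy
      have hrx := hmem1 x hx
      have hry := pv_rank_not_mem y (hmem2 y hy).2
      apply Prod.Lex.lt_iff.mpr
      left
      show PySem.Dict.getD ORDER_RANK x _ < PySem.Dict.getD ORDER_RANK y _
      rw [hry]
      have hx3 := hrx.1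
      simp only [MATRIX_VIEW_ORDER, List.mem_cons, List.not_mem_nil, or_false] at hx3
      rcases hx3 with h | h | h
      · subst h; decide
      · subst h; decide
      · subst h; decide


theorem pv_ports_eq (current incoming : String) :
    merge_source_views_py current incoming = merge_source_views_py_alt current incoming := by
  show PySem.Str.join ","
      (MATRIX_VIEW_ORDER.filter (fun v => PySem.Set.contains
          (PySem.Set.add (PySem.Set.ofList
            ((((PySem.Str.split? (PySem.Str.replace current "|" ",") ",").getD []).map
                PySem.Str.strip).filter (fun v => !(v == "")))) incoming) v)
        ++ PySem.List.sorted (PySem.Set.diff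
            (PySem.Set.add (PySem.Set.ofList
              ((((PySem.Str.split? (PySem.Str.replace current "|" ",") ",").getD []).map
                  PySem.Str.strip).filter (fun v => !(v == "")))) incoming)
            MATRIX_VIEW_ORDER) (fun x => x) false)
    = PySem.Str.join ","
        (PySem.List.sorted2
          (PySem.Set.add
            (((current.toList ++ [',']).foldl
              (fun (st : PySem.Set String × List Char) ch =>
                if ch == '|' || ch == ',' then
                  let t := PySem.Str.strip (String.ofList st.2)
                  (if t == "" then st.1 else PySem.Set.add st.1 t, ([] : List Char))
                else (st.1, st.2 ++ [ch]))
              (PySem.Set.empty, [])).1) incoming)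
          (fun v => PySem.Dict.getD ORDER_RANK v (MATRIX_VIEW_ORDER.length : Int))
          (fun v => v) false)
  rw [pv_tokens_A, pv_scan]
  refine congrArg (PySem.Str.join ",") (pv_phase _ _ ?hs ?ht ?hmem)
  case hs => exact PySem.Set.nodup_add _ _ (PySem.Set.nodup_ofList _)
  case ht => exact PySem.Set.nodup_add _ _ (pv_nodup_foldl_addIf _ _ List.nodup_nil)
  case hmem =>
    intro v
    rw [PySem.Set.mem_add, PySem.Set.mem_add, PySem.Set.mem_ofList, pv_mem_foldl_addIf]
    simp only [List.map_map, Function.comp_def, PySem.Set.empty, List.not_mem_nil, false_or]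

-- ===== VERDICT (by name: the statement is the Claim_ definition above) =====
theorem merge_source_views_py_spec : Claim_equal_merge_source_views_py := by
  intro current incoming _
  exact pv_ports_eq current incoming
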